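-- pv_equiv track=rewrite | github.com/SIS-111-2023-UCB-Paralelo-2/Leandro_Rodriguez | Ejercicios Intermedios 2 ( Refactoring)/Boleta de Calificaciones con vectores.py | separar_notas
-- ===== SOURCE A (Python) =====
-- def separar_notas(alumnos, notas):
--     alta = []
--     media = []
--     baja = []
--     for i in range(len(alumnos)):
--         if notas[i] >= 90:
--             alta.append(alumnos[i])
--         elif notas[i] >= 60:
--             media.append(alumnos[i])
--         else:
--             baja.append(alumnos[i])
--     return alta, media, baja
-- ===== SOURCE B (Python) =====
-- def separar_notas(alumnos, notas):
--     pares = list(zip(alumnos, notas))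
--     alta = [a for a, n in pares if n >= 90]
--     media = [a for a, n in pares if 60 <= n < 90]
--     baja = [a for a, n in pares if n < 60]
--     return alta, media, baja
-- ===== Notes on version B (the rewrite author's own statement) =====
-- stated objective: alternative
-- what changed: Replaces the single index-driven partitioning loop with three independent filtering comprehensions over a zip of the two lists.
import Mathlib
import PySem

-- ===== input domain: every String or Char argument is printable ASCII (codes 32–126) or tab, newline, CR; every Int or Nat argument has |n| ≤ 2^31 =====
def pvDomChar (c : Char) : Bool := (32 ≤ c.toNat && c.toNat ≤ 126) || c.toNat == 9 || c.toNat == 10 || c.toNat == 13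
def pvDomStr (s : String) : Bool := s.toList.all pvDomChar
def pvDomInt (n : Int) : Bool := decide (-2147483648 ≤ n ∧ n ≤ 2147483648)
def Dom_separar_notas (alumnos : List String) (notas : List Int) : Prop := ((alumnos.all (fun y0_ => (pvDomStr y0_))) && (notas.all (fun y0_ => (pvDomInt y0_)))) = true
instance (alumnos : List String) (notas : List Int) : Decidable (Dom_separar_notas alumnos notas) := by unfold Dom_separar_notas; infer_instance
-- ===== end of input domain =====

-- B partitions by three independent filtering passes over a zip instead of A's single index loop; same cost, different decomposition (return-value equivalence only).

-- ===== PORT A =====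
-- single loop over range(len(alumnos)), appending to one of three accumulators
def separar_notas (alumnos : List String) (notas : List Int) : List String × List String × List String :=
  let r := (PySem.List.pyRange 0 (alumnos.length : Int) 1).foldl
    (fun (s : List String × List String × List String) i =>
      if PySem.List.pyGetD notas i 0 ≥ 90 then (s.1 ++ [PySem.List.pyGetD alumnos i ""], s.2.1, s.2.2)
      else if PySem.List.pyGetD notas i 0 ≥ 60 then (s.1, s.2.1 ++ [PySem.List.pyGetD alumnos i ""], s.2.2)
      else (s.1, s.2.1, s.2.2 ++ [PySem.List.pyGetD alumnos i ""]))
    ([], [], [])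
  r

-- ===== PORT B =====
-- pares = zip(alumnos, notas); three filtering comprehensions
def separar_notas_alt (alumnos : List String) (notas : List Int) : List String × List String × List String :=
  let pares := alumnos.zip notas
  ((pares.filter (fun p => p.2 ≥ 90)).map (·.1),
   (pares.filter (fun p => 60 ≤ p.2 ∧ p.2 < 90)).map (·.1),
   (pares.filter (fun p => p.2 < 60)).map (·.1))

-- ===== PRECONDITION & SPEC =====
-- A raises IndexError on notas[i] when notas is shorter than alumnos; exactly those inputs are excluded.
def Pre_separar_notas (alumnos : List String) (notas : List Int) : Prop := alumnos.length ≤ notas.length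
instance (alumnos : List String) (notas : List Int) : Decidable (Pre_separar_notas alumnos notas) := by unfold Pre_separar_notas; infer_instance
def pvWitness_separar_notas : List String × List Int := (["ana", "bo", "cy"], [95, 60, 10])

def Spec_separar_notas (alumnos : List String) (notas : List Int) (out : List String × List String × List String) : Prop := out = separar_notas_alt alumnos notas
instance (alumnos : List String) (notas : List Int) (out : List String × List String × List String) : Decidable (Spec_separar_notas alumnos notas out) := by unfold Spec_separar_notas; infer_instance

-- ===== CLAIM (what is proved, stated in full; the proofs are below) =====
def Claim_equal_separar_notas : Prop := ∀ (alumnos : List String) (notas : List Int), Dom_separar_notas alumnos notas → Pre_separar_notas alumnos notas → Spec_separar_notas alumnos notas (separar_notas alumnos notas)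

-- ===== LEMMAS AND PROOFS =====

-- A's loop body, written on a zipped pair (the form the congruence rewrite produces)
def pvStepZ (s : List String × List String × List String) (p : String × Int) : List String × List String × List String :=
  if p.2 ≥ 90 then (s.1 ++ [p.1], s.2.1, s.2.2)
  else if p.2 ≥ 60 then (s.1, s.2.1 ++ [p.1], s.2.2)
  else (s.1, s.2.1, s.2.2 ++ [p.1])

-- the triple-accumulator fold is the three filters
theorem pvTri (zs : List (String × Int)) : ∀ (x y z : List String),
    zs.foldl pvStepZ (x, y, z) =
      (x ++ (zs.filter (fun p => p.2 ≥ 90)).map (·.1),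
       y ++ (zs.filter (fun p => 60 ≤ p.2 ∧ p.2 < 90)).map (·.1),
       z ++ (zs.filter (fun p => p.2 < 60)).map (·.1)) := by
  induction zs with
  | nil => intro x y z; simp
  | cons p t ih =>
    intro x y z
    simp only [List.foldl_cons, pvStepZ]
    by_cases h90 : p.2 ≥ 90
    · have h1 : ¬ (60 ≤ p.2 ∧ p.2 < 90) := by omega
      have h2 : ¬ p.2 < 60 := by omega
      simp [h90, ih, h1, h2]
    · by_cases h60 : p.2 ≥ 60
      · have h1 : (60 ≤ p.2 ∧ p.2 < 90) := by omega
        have h2 : ¬ p.2 < 60 := by omega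
        simp [h90, h60, ih, h1, h2]
      · have h : p.2 < 60 := by omega
        simp [h90, h60, ih, h]

theorem separar_notas_spec : Claim_equal_separar_notas := by
  intro alumnos notas _ hpre
  unfold Pre_separar_notas at hpre
  unfold Spec_separar_notas separar_notas separar_notas_alt
  have hlen : (alumnos.zip notas).length = alumnos.length := by
    simp [List.length_zip]; omega
  have hcong : (PySem.List.pyRange 0 (alumnos.length : Int) 1).foldl
      (fun (s : List String × List String × List String) i =>
        if PySem.List.pyGetD notas i 0 ≥ 90 then (s.1 ++ [PySem.List.pyGetD alumnos i ""], s.2.1, s.2.2)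
        else if PySem.List.pyGetD notas i 0 ≥ 60 then (s.1, s.2.1 ++ [PySem.List.pyGetD alumnos i ""], s.2.2)
        else (s.1, s.2.1, s.2.2 ++ [PySem.List.pyGetD alumnos i ""]))
      ([], [], []) =
    (PySem.List.pyRange 0 ((alumnos.zip notas).length : Int) 1).foldl
      (fun s i => pvStepZ s (PySem.List.pyGetD (alumnos.zip notas) i ("", 0)))
      ([], [], []) := by
    rw [hlen]
    apply PySem.List.foldl_congr_mem
    intro acc i hi
    have hi' := PySem.List.mem_pyRange_one.mp hi
    have h0 : 0 ≤ i := hi'.1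
    have hlt : i.toNat < alumnos.length := by omega
    have hltz : i.toNat < (alumnos.zip notas).length := by omega
    have hltn : i.toNat < notas.length := by omega
    rw [PySem.List.pyGetD_eq_getElem notas 0 h0 (by omega),
        PySem.List.pyGetD_eq_getElem alumnos "" h0 (by omega),
        PySem.List.pyGetD_eq_getElem (alumnos.zip notas) ("", 0) h0 (by omega)]
    simp [pvStepZ, List.getElem_zip]
  rw [hcong, PySem.List.foldl_pyRange_zero_pyGetD' (alumnos.zip notas) ("", 0) pvStepZ ([], [], []), pvTri]
  simp
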